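-- pv_equiv track=rewrite | github.com/benoxoft/adventofcode2016 | day16/day16.py | fill_disk
-- ===== SOURCE A (Python) =====
-- rev = {
--     "0": "1",
--     "1": "0"
-- }
--
-- def fill_disk(data, disksize):
--     while True:
--         revstr = ''.join([rev[c] for c in data[::-1]])
--         newstr: str = data + "0" + revstr
--         if len(newstr) > disksize:
--             return newstr[0:disksize]
--         else:
--             data = newstr
-- ===== SOURCE B (Python) =====
-- # Closed-form dragon curve: the infinite stream is periodic blocks of data /
-- # its reversed complement, with paperfolding separator bits; emit disksize chars.
-- rev = {
--     "0": "1",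
--     "1": "0"
-- }
--
-- def fill_disk(data, disksize):
--     L = len(data)
--     rc = ''.join([rev[c] for c in data[::-1]])
--     out = []
--     for p in range(disksize):
--         u, r = divmod(p, L + 1)
--         if r < L:
--             out.append(data[r] if u % 2 == 0 else rc[r])
--         else:
--             n = u + 1
--             while n % 2 == 0:
--                 n //= 2
--             out.append("0" if n % 4 == 1 else "1")
--     return ''.join(out)
-- ===== Notes on version B (the rewrite author's own statement) =====
-- stated objective: alternative
-- what changed: B replaces A's repeated whole-string doubling (data -> data+'0'+reverse-complement until long enough, then truncate) by a closed-form per-position generator: the infinite dragon stream is periodic with period len(data)+1 (data or its reversed complement alternating, with regular-paperfolding separator bits), so B emits each of the disksize characters directly from its index.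
-- intended difference: On disksize < 0 with 2*len(data)+1+disksize > 0, A's newstr[0:disksize] accidentally returns a nonempty prefix of one dragon expansion (e.g. fill_disk('1',-1) = '10'), while B returns '' — the intended content of a disk of non-positive size. — e.g. on fill_disk("1", -1): A returns "10", B returns ""
import Mathlib
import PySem

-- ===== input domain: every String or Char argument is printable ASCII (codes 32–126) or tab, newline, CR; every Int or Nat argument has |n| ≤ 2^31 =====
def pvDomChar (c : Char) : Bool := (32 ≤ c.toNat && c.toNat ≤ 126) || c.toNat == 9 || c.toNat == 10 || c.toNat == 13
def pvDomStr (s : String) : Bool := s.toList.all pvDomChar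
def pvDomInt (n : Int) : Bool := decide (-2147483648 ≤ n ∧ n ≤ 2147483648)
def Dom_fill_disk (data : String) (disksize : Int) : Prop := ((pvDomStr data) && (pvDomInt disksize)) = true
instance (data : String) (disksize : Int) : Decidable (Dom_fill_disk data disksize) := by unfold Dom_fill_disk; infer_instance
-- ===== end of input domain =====

-- B replaces A's repeated doubling of the whole string by a closed-form per-position
-- generation of the dragon-curve stream (periodic data/reversed-complement blocks with
-- paperfolding separator bits); objective: alternative (same O(disksize) cost).


-- ===== PORT A =====
-- module-level dict `rev` (keys/values are the 1-char strings "0"/"1"; ported over Char)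
def pvRevA : PySem.Dict Char Char := (PySem.Dict.empty.insert '0' '1').insert '1' '0'

-- the `while True` loop; `data[::-1]` is reverse (PySem.List.slice?_none_none_neg_one);
-- `rev[c]` raises KeyError on non-binary chars (excluded by Pre_): `.getD c` there is arbitrary.
def pvLoopA (data : List Char) (disksize : Int) : List Char :=
  let revstr := data.reverse.map (fun c => (pvRevA.get? c).getD c)
  let newstr := data ++ '0' :: revstr
  if ((newstr.length : Int) > disksize) then PySem.List.slice newstr (some 0) (some disksize)
  else pvLoopA newstr disksize
termination_by (disksize.toNat + 1) - data.length
decreasing_by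
  simp only [newstr, revstr, List.length_append, List.length_cons, List.length_map,
    List.length_reverse, not_lt] at *
  omega

def fill_disk (data : String) (disksize : Int) : String :=
  String.ofList (pvLoopA data.toList disksize)

-- ===== PORT B =====
-- B's own module-level dict `rev`
def pvRevB : PySem.Dict Char Char := (PySem.Dict.empty.insert '0' '1').insert '1' '0'

-- B's inner `while n % 2 == 0: n //= 2`; n ≥ 1 where called, so `fuel = n` iterations
-- always suffice (each step halves n); the fuel only makes the loop structurally total.
def pvSepLoop : Nat → Nat → Nat
  | 0, n => n
  | fuel + 1, n => if n % 2 = 0 ∧ n ≠ 0 then pvSepLoop fuel (n / 2) else n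

-- the `for p in range(disksize)` loop appending one char per position, then ''.join;
-- divmod(p, L+1) = (floordiv, mod); data[r]/rc[r] are in range wherever evaluated, so
-- `.getD ' '` is never used.
def fill_disk_alt (data : String) (disksize : Int) : String :=
  let L : Int := data.toList.length
  let rc := data.toList.reverse.map (fun c => (pvRevB.get? c).getD c)
  let out := (PySem.List.pyRange 0 disksize 1).map (fun p =>
    let u := PySem.Int.floordiv p (L + 1)
    let r := PySem.Int.mod p (L + 1)
    if r < L then
      (if PySem.Int.mod u 2 = 0 then (PySem.List.pyGet? data.toList r).getD ' '
       else (PySem.List.pyGet? rc r).getD ' ')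
    else
      let n := pvSepLoop (u + 1).toNat (u + 1).toNat
      if n % 4 = 1 then '0' else '1')
  String.ofList out

-- ===== PRECONDITION & SPEC =====
-- Pre_ excludes data containing a char other than '0'/'1': there A raises KeyError.
def Pre_fill_disk (data : String) (disksize : Int) : Prop :=
  (data.toList.all (fun c => c == '0' || c == '1')) = true
instance (data : String) (disksize : Int) : Decidable (Pre_fill_disk data disksize) := by
  unfold Pre_fill_disk; infer_instance

def pvWitness_fill_disk : String × Int := ("10", 6)

-- On negative disksize that does not reach back past one expansion (disksize < 0 and
-- 2*len(data)+1+disksize > 0), A's `newstr[0:disksize]` accidentally returns a nonempty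
-- prefix of one dragon expansion, while B returns "" — the intended content of a
-- disk of non-positive size.
def D_fill_disk (data : String) (disksize : Int) : Prop :=
  disksize < 0 ∧ 0 < 2 * (data.toList.length : Int) + 1 + disksize
instance (data : String) (disksize : Int) : Decidable (D_fill_disk data disksize) := by
  unfold D_fill_disk; infer_instance

def Spec_fill_disk (data : String) (disksize : Int) (out : String) : Prop :=
  ¬ D_fill_disk data disksize → out = fill_disk_alt data disksize
instance (data : String) (disksize : Int) (out : String) : Decidable (Spec_fill_disk data disksize out) := by
  unfold Spec_fill_disk; infer_instance

def pvDiffWitness_fill_disk : String × Int := ("1", -1)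
def pvDiffWitnessOut_fill_disk : String × String := ("10", "")

-- ===== CLAIM (what is proved, stated in full; the proofs are below) =====
def Claim_unchanged_fill_disk : Prop := ∀ (data : String) (disksize : Int), Dom_fill_disk data disksize → Pre_fill_disk data disksize → Spec_fill_disk data disksize (fill_disk data disksize)
def Claim_changed_fill_disk : Prop := Dom_fill_disk (pvDiffWitness_fill_disk.1) (pvDiffWitness_fill_disk.2) ∧ Pre_fill_disk (pvDiffWitness_fill_disk.1) (pvDiffWitness_fill_disk.2) ∧ D_fill_disk (pvDiffWitness_fill_disk.1) (pvDiffWitness_fill_disk.2) ∧ fill_disk (pvDiffWitness_fill_disk.1) (pvDiffWitness_fill_disk.2) = pvDiffWitnessOut_fill_disk.1 ∧ fill_disk_alt (pvDiffWitness_fill_disk.1) (pvDiffWitness_fill_disk.2) = pvDiffWitnessOut_fill_disk.2 ∧ pvDiffWitnessOut_fill_disk.1 ≠ pvDiffWitnessOut_fill_disk.2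
def Claim_exact_fill_disk : Prop := ∀ (data : String) (disksize : Int), Dom_fill_disk data disksize → Pre_fill_disk data disksize → D_fill_disk data disksize → fill_disk data disksize ≠ fill_disk_alt data disksize

-- ===== LEMMAS AND PROOFS =====


def pvF (c : Char) : Char := if c = '1' then '0' else if c = '0' then '1' else c
def pvRC (d : List Char) : List Char := d.reverse.map pvF

theorem pvF_invol {c : Char} (h : c = '0' ∨ c = '1') : pvF (pvF c) = c := by
  rcases h with h | h <;> subst h <;> rfl
def pvBin (d : List Char) : Prop := ∀ c ∈ d, c = '0' ∨ c = '1'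

def pvOdd (n : Nat) : Nat :=
  if h : n % 2 = 0 ∧ n ≠ 0 then pvOdd (n / 2) else n
decreasing_by omega



theorem pvOdd_odd {n : Nat} (h : n % 2 = 1) : pvOdd n = n := by
  rw [pvOdd]; simp [h]

theorem pvOdd_double {m : Nat} (h : 0 < m) : pvOdd (2 * m) = pvOdd m := by
  rw [pvOdd]
  have h2 : (2*m) % 2 = 0 ∧ 2*m ≠ 0 := by omega
  simp [h2]

theorem pvOdd_mod_two : ∀ n : Nat, 0 < n → pvOdd n % 2 = 1 := by
  intro n
  induction n using Nat.strong_induction_on with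
  | _ n ih =>
    intro hn
    rcases Nat.even_or_odd n with ⟨m, hm⟩ | ho
    · have hm0 : 0 < m := by omega
      have hn2 : n = 2 * m := by omega
      rw [hn2, pvOdd_double hm0]
      exact ih m (by omega) hm0
    · obtain ⟨r, hr⟩ := ho
      rw [pvOdd_odd (by omega)]; omega

theorem pvOdd_two_pow : ∀ k : Nat, pvOdd (2 ^ k) = 1 := by
  intro k
  induction k with
  | zero => exact pvOdd_odd (by decide)
  | succ k ih =>
    have h : 2 ^ (k+1) = 2 * 2 ^ k := by ring
    rw [h, pvOdd_double (Nat.pow_pos (by omega)), ih]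

theorem pvOdd_reflect : ∀ (k n : Nat), 1 ≤ n → n < 2 ^ k →
    pvOdd (2 ^ (k+1) - n) % 4 + pvOdd n % 4 = 4 := by
  intro k
  induction k with
  | zero => intro n h1 h2; omega
  | succ k ih =>
    intro n h1 h2
    have e1 : 2 ^ (k+1) = 2 * 2 ^ k := by ring
    have e2 : 2 ^ (k+1+1) = 4 * 2 ^ k := by ring
    have hp : 0 < 2 ^ k := Nat.pow_pos (by omega)
    rcases Nat.even_or_odd n with ⟨m, hm⟩ | ho
    · have hm1 : 1 ≤ m := by omega
      have hm2 : m < 2 ^ k := by omega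
      have e3 : 2 ^ (k+1+1) - n = 2 * (2 ^ (k+1) - m) := by omega
      have hn2 : n = 2 * m := by omega
      rw [e3, pvOdd_double (by omega), hn2, pvOdd_double hm1]
      exact ih m hm1 hm2
    · obtain ⟨r, hr⟩ := ho
      have ho' : n % 2 = 1 := by omega
      have hodd2 : (2 ^ (k+1+1) - n) % 2 = 1 := by omega
      rw [pvOdd_odd ho', pvOdd_odd hodd2]
      omega

def pvSep (n : Nat) : Char := if pvOdd n % 4 = 1 then '0' else '1'

def pvChar (d : List Char) (p : Nat) : Char :=
  if p % (d.length + 1) < d.length then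
    (if (p / (d.length + 1)) % 2 = 0 then d.getD (p % (d.length + 1)) ' '
     else (pvRC d).getD (p % (d.length + 1)) ' ')
  else pvSep (p / (d.length + 1) + 1)

theorem pvDivMod {L b i : Nat} (hi : i < L + 1) :
    (b * (L+1) + i) % (L+1) = i ∧ (b * (L+1) + i) / (L+1) = b := by
  constructor
  · simp [Nat.mod_eq_of_lt hi]
  · rw [Nat.mul_comm, Nat.mul_add_div (by omega), Nat.div_eq_of_lt hi]
    omega

theorem pvChar_block (d : List Char) (b i : Nat) (hi : i < d.length) :
    pvChar d (b * (d.length + 1) + i) =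
      (if b % 2 = 0 then d.getD i ' ' else (pvRC d).getD i ' ') := by
  obtain ⟨hm, hd⟩ := pvDivMod (L := d.length) (b := b) (i := i) (by omega)
  unfold pvChar
  rw [hm, hd]
  simp [hi]

theorem pvChar_sep (d : List Char) (b : Nat) :
    pvChar d (b * (d.length + 1) + d.length) = pvSep (b + 1) := by
  obtain ⟨hm, hd⟩ := pvDivMod (L := d.length) (b := b) (i := d.length) (by omega)
  unfold pvChar
  rw [hm, hd]
  simp

theorem pvRC_getD (d : List Char) (i : Nat) (hi : i < d.length) :
    (pvRC d).getD i ' ' = pvF (d.getD (d.length - 1 - i) ' ') := by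
  unfold pvRC
  rw [List.getD_eq_getElem _ _ (by simpa using hi), List.getD_eq_getElem _ _ (by omega)]
  rw [List.getElem_map, List.getElem_reverse]

theorem pvSep_reflect (k n : Nat) (h1 : 1 ≤ n) (h2 : n < 2 ^ k) :
    pvSep (2 ^ (k+1) - n) = pvF (pvSep n) := by
  have hr := pvOdd_reflect k n h1 h2
  have o1 := pvOdd_mod_two n (by omega)
  have o2 : 0 < 2 ^ (k+1) - n := by
    have : 2 ^ (k+1) = 2 * 2 ^ k := by ring
    omega
  have ha : pvOdd n % 4 = 1 ∨ pvOdd n % 4 = 3 := by omega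
  unfold pvSep pvF
  rcases ha with h | h
  · have : pvOdd (2 ^ (k+1) - n) % 4 = 3 := by omega
    simp [h, this]
  · have : pvOdd (2 ^ (k+1) - n) % 4 = 1 := by omega
    simp [h, this]

theorem pvArith_block (L M a r p q : Nat) (hM : 0 < M)
    (hsum : p + q = 2 * ((L+1) * M) - 2) (hq : q < (L+1) * M - 1)
    (hdec : (L+1) * a + r = q) (hr : r < L) :
    p = (2*M - a - 1) * (L+1) + (L - 1 - r) ∧ a < M := by
  have hPM : 1 ≤ (L+1) * M := Nat.one_le_iff_ne_zero.mpr (by positivity)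
  have haM : a < M := Nat.lt_of_mul_lt_mul_left (a := L+1) (by omega)
  refine ⟨?_, haM⟩
  have hb1 : a ≤ 2 * M := by omega
  have hb1' : 1 ≤ 2 * M - a := by omega
  have hbL : 1 ≤ L := by omega
  have hb2 : r ≤ L - 1 := by omega
  have hb3 : 2 ≤ 2 * ((L+1) * M) := by omega
  zify [hb1, hb1', hbL, hb2, hb3] at hsum hdec ⊢
  linear_combination hsum + hdec

theorem pvArith_sep (L M a p q : Nat) (hM : 0 < M)
    (hsum : p + q = 2 * ((L+1) * M) - 2) (hq : q < (L+1) * M - 1)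
    (hdec : (L+1) * a + L = q) :
    p = (2*M - a - 2) * (L+1) + L ∧ a + 1 < M := by
  have hPM : 1 ≤ (L+1) * M := Nat.one_le_iff_ne_zero.mpr (by positivity)
  have haM : a + 1 < M := by
    have h1 : (L+1) * (a+1) < (L+1) * M := by
      have : (L+1) * (a+1) = (L+1) * a + (L+1) := by ring
      omega
    exact Nat.lt_of_mul_lt_mul_left h1
  refine ⟨?_, haM⟩
  have hb1 : a ≤ 2 * M := by omega
  have hb1' : 2 ≤ 2 * M - a := by omega
  have hb3 : 2 ≤ 2 * ((L+1) * M) := by omega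
  zify [hb1, hb1', hb3] at hsum hdec ⊢
  linear_combination hsum + hdec

theorem pvChar_flip (d : List Char) (hbin : pvBin d) (k p q : Nat)
    (hsum : p + q = 2 * ((d.length + 1) * 2 ^ k) - 2)
    (hq : q < (d.length + 1) * 2 ^ k - 1) :
    pvChar d p = pvF (pvChar d q) := by
  have hM : 0 < 2 ^ k := Nat.pow_pos (by omega)
  set L := d.length with hL
  set M := 2 ^ k with hMdef
  obtain ⟨a, r, hdec, hrP⟩ : ∃ a r, (L + 1) * a + r = q ∧ r < L + 1 :=
    ⟨q / (L + 1), q % (L + 1), Nat.div_add_mod q (L + 1), Nat.mod_lt _ (by omega)⟩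
  by_cases hrL : r < L
  · obtain ⟨hp, haM⟩ := pvArith_block L M a r p q hM hsum hq hdec hrL
    have hq2 : q = a * (L + 1) + r := by rw [Nat.mul_comm] at hdec; omega
    rw [hp, hq2, pvChar_block d _ _ (by omega), pvChar_block d _ _ hrL]
    have hpar : (2 * M - a - 1) % 2 = 1 - a % 2 := by omega
    by_cases hae : a % 2 = 0
    · have h1 : ¬ ((2 * M - a - 1) % 2 = 0) := by omega
      simp only [hae, if_neg h1]
      rw [pvRC_getD d _ (by omega)]
      congr 2
      omega
    · have h1 : (2 * M - a - 1) % 2 = 0 := by omega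
      simp only [if_pos h1, if_neg hae]
      rw [pvRC_getD d _ hrL]
      rw [pvF_invol]
      apply hbin
      rw [List.getD_eq_getElem _ _ (by omega)]
      exact List.getElem_mem _
  · have hrLL : r = L := by omega
    subst hrLL
    obtain ⟨hp, haM⟩ := pvArith_sep L M a p q hM hsum hq hdec
    have hq2 : q = a * (L + 1) + L := by rw [Nat.mul_comm] at hdec; omega
    rw [hp, hq2, pvChar_sep d _, pvChar_sep d _]
    have e1 : 2 ^ (k + 1) = 2 * M := by rw [hMdef]; ring
    rw [show 2 * M - a - 2 + 1 = 2 ^ (k + 1) - (a + 1) by omega]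
    exact pvSep_reflect k (a + 1) (by omega) haM

def pvE (s : List Char) : List Char := s ++ '0' :: (s.reverse.map pvF)

theorem pvE_len (s : List Char) : (pvE s).length = 2 * s.length + 1 := by
  simp [pvE]; omega

theorem pvE_getD_lt {s : List Char} {p : Nat} (h : p < s.length) :
    (pvE s).getD p ' ' = s.getD p ' ' := by
  unfold pvE
  rw [List.getD_eq_getElem _ _ (by simp; omega), List.getD_eq_getElem _ _ h]
  rw [List.getElem_append_left h]

theorem pvE_getD_mid (s : List Char) : (pvE s).getD s.length ' ' = '0' := by
  unfold pvE
  rw [List.getD_eq_getElem _ _ (by simp)]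
  rw [List.getElem_append_right (by omega)]
  simp

theorem pvE_getD_hi {s : List Char} {i : Nat} (h : i < s.length) :
    (pvE s).getD (s.length + 1 + i) ' ' = pvF (s.getD (s.length - 1 - i) ' ') := by
  unfold pvE
  rw [List.getD_eq_getElem _ _ (by simp; omega)]
  rw [List.getElem_append_right (by omega)]
  have : s.length + 1 + i - s.length = i + 1 := by omega
  simp only [this]
  show (s.reverse.map pvF)[i]'(by simp; omega) = _
  have := pvRC_getD s i h
  unfold pvRC at this
  rw [List.getD_eq_getElem _ _ (by simp; omega)] at this
  exact this

def pvSect (d s : List Char) : Prop :=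
  ∃ k, s.length = (d.length + 1) * 2 ^ k - 1 ∧ ∀ p, p < s.length → s.getD p ' ' = pvChar d p

theorem pvSect_base (d : List Char) : pvSect d d := by
  refine ⟨0, by simp, ?_⟩
  intro p hp
  unfold pvChar
  rw [Nat.mod_eq_of_lt (by omega), Nat.div_eq_of_lt (by omega)]
  simp [hp]

theorem pvSect_step {d s : List Char} (hbin : pvBin d) (h : pvSect d s) :
    pvSect d (pvE s) := by
  obtain ⟨k, hlen, hch⟩ := h
  have hpos : 1 ≤ (d.length + 1) * 2 ^ k := Nat.one_le_iff_ne_zero.mpr (by positivity)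
  have e2 : (d.length + 1) * 2 ^ (k + 1) = 2 * ((d.length + 1) * 2 ^ k) := by ring
  refine ⟨k + 1, by rw [pvE_len]; omega, ?_⟩
  intro p hp
  rw [pvE_len] at hp
  rcases lt_trichotomy p s.length with hlt | heq | hgt
  · rw [pvE_getD_lt hlt, hch p hlt]
  · subst heq
    rw [pvE_getD_mid]
    have hNdec : s.length = (2 ^ k - 1) * (d.length + 1) + d.length := by
      have hk : 1 ≤ 2 ^ k := Nat.one_le_iff_ne_zero.mpr (by positivity)
      zify [hk, hpos] at hlen ⊢
      linear_combination hlen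
    rw [hNdec, pvChar_sep d _]
    have : 2 ^ k - 1 + 1 = 2 ^ k := by
      have hk : 1 ≤ 2 ^ k := Nat.one_le_iff_ne_zero.mpr (by positivity)
      omega
    rw [this]
    unfold pvSep
    rw [pvOdd_two_pow]
    norm_num
  · set i := p - s.length - 1 with hi
    have hiN : i < s.length := by omega
    have hpe : p = s.length + 1 + i := by omega
    rw [hpe, pvE_getD_hi hiN, hch _ (by omega)]
    have hflip := pvChar_flip d hbin k p (s.length - 1 - i)
      (by omega) (by omega)
    rw [hpe] at hflip
    rw [hflip]

theorem pvRevA_get (c : Char) : ((pvRevA.get? c).getD c) = pvF c := by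
  unfold pvRevA pvF
  by_cases h1 : c = '1'
  · subst h1; rw [PySem.Dict.get?_insert_self]; rfl
  · rw [PySem.Dict.get?_insert_of_ne _ _ h1]
    by_cases h0 : c = '0'
    · subst h0; rw [PySem.Dict.get?_insert_self]; rfl
    · rw [PySem.Dict.get?_insert_of_ne _ _ h0, PySem.Dict.get?_empty]
      simp [h1, h0]

theorem pvRevB_eq : pvRevB = pvRevA := rfl

theorem pvNewstr (s : List Char) :
    (s ++ '0' :: s.reverse.map (fun c => (pvRevA.get? c).getD c)) = pvE s := by
  unfold pvE
  simp only [pvRevA_get]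

theorem pvSepLoop_eq : ∀ fuel n : Nat, n ≤ fuel → pvSepLoop fuel n = pvOdd n := by
  intro fuel
  induction fuel with
  | zero => intro n h; interval_cases n; rw [pvOdd]; simp [pvSepLoop]
  | succ f ih =>
    intro n h
    show (if n % 2 = 0 ∧ n ≠ 0 then pvSepLoop f (n / 2) else n) = pvOdd n
    by_cases hc : n % 2 = 0 ∧ n ≠ 0
    · rw [if_pos hc, ih _ (by omega)]
      conv_rhs => rw [pvOdd]
      simp [hc]
    · rw [if_neg hc, pvOdd]
      simp [hc]

theorem pvSlice_eq (d t : List Char) (ds : Int) (h0 : 0 ≤ ds) (hlt : ds < (t.length : Int))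
    (hch : ∀ p, p < t.length → t.getD p ' ' = pvChar d p) :
    PySem.List.slice t (some 0) (some ds) =
      (PySem.List.pyRange 0 ds 1).map (fun p => pvChar d p.toNat) := by
  rw [PySem.List.slice_zero_start, PySem.List.slice_to _ h0, PySem.List.pyRange_one]
  apply List.ext_getElem
  · simp
    omega
  · intro i hi1 hi2
    simp only [List.getElem_take, List.getElem_map, List.getElem_range]
    have hit : i < t.length := by simp at hi1; omega
    rw [← List.getD_eq_getElem t ' ' hit, hch i hit]
    congr 1
    simp

theorem pvAlt (data : String) (ds : Int) :
    fill_disk_alt data ds =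
      String.ofList ((PySem.List.pyRange 0 ds 1).map (fun p => pvChar data.toList p.toNat)) := by
  unfold fill_disk_alt
  dsimp only
  congr 1
  apply List.map_congr_left
  intro p hp
  rw [PySem.List.mem_pyRange_one] at hp
  set len := data.toList.length with hlen
  have hpm : p = ((p.toNat : Nat) : Int) := by omega
  have hcast : (len : Int) + 1 = ((len + 1 : Nat) : Int) := by push_cast; ring
  set m := p.toNat with hm
  rw [hpm, hcast, PySem.Int.floordiv_natCast, PySem.Int.mod_natCast]
  have hrc : data.toList.reverse.map (fun c => (pvRevB.get? c).getD c) = pvRC data.toList := by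
    unfold pvRC
    simp only [pvRevB_eq, pvRevA_get]
  rw [hrc]
  have hmod2 : PySem.Int.mod ((m / (len + 1) : Nat) : Int) 2 = (((m / (len + 1)) % 2 : Nat) : Int) := by
    rw [PySem.Int.mod_eq_emod_of_pos (show (0:Int) < 2 by omega)]
    omega
  rw [hmod2]
  unfold pvChar
  rw [← hlen]
  by_cases hblock : m % (len + 1) < len
  · rw [if_pos (by exact_mod_cast hblock), if_pos hblock]
    by_cases hu : (m / (len + 1)) % 2 = 0
    · rw [if_pos (by exact_mod_cast hu), if_pos hu]
      rw [PySem.List.pyGet?_natCast]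
      rw [List.getD_eq_getElem?_getD]
    · rw [if_neg (by exact_mod_cast hu), if_neg hu]
      rw [PySem.List.pyGet?_natCast]
      rw [List.getD_eq_getElem?_getD]
  · rw [if_neg (by exact_mod_cast hblock), if_neg hblock]
    have he : ((Nat.cast (m / (len + 1)) : Int) + 1).toNat = m / (len + 1) + 1 := by
      rw [show ((Nat.cast (m / (len + 1)) : Int) + 1) = ((m / (len + 1) + 1 : Nat) : Int) by push_cast; ring,
        Int.toNat_natCast]
    rw [he, pvSepLoop_eq _ _ (le_refl _)]
    rfl

theorem pvLoopA_eq (d : List Char) (hbin : pvBin d) (ds : Int) (h0 : 0 ≤ ds) :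
    ∀ n s, ds.toNat + 1 - s.length ≤ n → pvSect d s →
      pvLoopA s ds = (PySem.List.pyRange 0 ds 1).map (fun p => pvChar d p.toNat) := by
  intro n
  induction n with
  | zero =>
    intro s hn hs
    rw [pvLoopA]
    simp only [pvNewstr]
    obtain ⟨k, hlen, hch⟩ := pvSect_step (d := d) (s := s) hbin hs
    rw [if_pos (by rw [pvE_len]; push_cast; omega)]
    exact pvSlice_eq d _ ds h0 (by rw [pvE_len]; push_cast; omega) hch
  | succ n ih =>
    intro s hn hs
    rw [pvLoopA]
    simp only [pvNewstr]
    obtain ⟨k, hlen, hch⟩ := pvSect_step (d := d) (s := s) hbin hs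
    by_cases hc : (((pvE s).length : Int) > ds)
    · rw [if_pos hc]
      exact pvSlice_eq d _ ds h0 (by omega) hch
    · rw [if_neg hc]
      apply ih
      · rw [pvE_len]
        rw [pvE_len] at hc
        push_cast at hc
        omega
      · exact pvSect_step hbin hs

theorem pvA_neg (data : List Char) (ds : Int) (hneg : ds < 0) :
    pvLoopA data ds = PySem.List.slice (pvE data) (some 0) (some ds) := by
  rw [pvLoopA]
  simp only [pvNewstr]
  rw [if_pos (by rw [pvE_len]; push_cast; omega)]

-- ===== VERDICT (by name: the statement is the Claim_ definition above) =====

theorem fill_disk_spec : Claim_unchanged_fill_disk := by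
  intro data ds hdom hpre hD
  have hbin : pvBin data.toList := fun c hc => by simpa using List.all_eq_true.mp hpre c hc
  by_cases h0 : 0 ≤ ds
  · unfold fill_disk
    rw [pvLoopA_eq data.toList hbin ds h0 (ds.toNat + 1) data.toList (by omega) (pvSect_base _)]
    rw [pvAlt data ds]
  · -- ds < 0, and ¬D gives 2*len+1+ds ≤ 0: both sides are ""
    unfold D_fill_disk at hD
    have hle : 2 * (data.toList.length : Int) + 1 + ds ≤ 0 := by
      by_contra hc
      exact hD ⟨by omega, by omega⟩
    have hk : ds = -(((-ds).toNat : Nat) : Int) := by omega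
    unfold fill_disk
    rw [pvA_neg _ _ (by omega), PySem.List.slice_zero_start, hk,
      PySem.List.slice_to_neg_natCast _ _ (by omega)]
    have htake : (pvE data.toList).length - (-ds).toNat = 0 := by
      rw [pvE_len]; omega
    rw [htake, List.take_zero]
    unfold fill_disk_alt
    dsimp only
    rw [hk, PySem.List.pyRange_one_eq_nil (by omega)]
    rfl

set_option maxRecDepth 8192 in
theorem fill_disk_changed : Claim_changed_fill_disk := by
  unfold Claim_changed_fill_disk
  refine ⟨by decide, by decide, by decide, ?_, by decide, by decide⟩
  show fill_disk "1" (-1) = "10"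
  unfold fill_disk
  rw [pvA_neg _ _ (by norm_num)]
  decide

theorem fill_disk_tight : Claim_exact_fill_disk := by
  intro data ds hdom hpre hD
  obtain ⟨hneg, hpos⟩ := hD
  set k := (-ds).toNat with hkk
  have hk : ds = -((k : Nat) : Int) := by omega
  have hA : fill_disk data ds =
      String.ofList ((pvE data.toList).take ((pvE data.toList).length - k)) := by
    unfold fill_disk
    rw [pvA_neg _ _ (by omega), PySem.List.slice_zero_start, hk,
      PySem.List.slice_to_neg_natCast _ _ (by omega)]
  have hB : fill_disk_alt data ds = String.ofList [] := by
    unfold fill_disk_alt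
    dsimp only
    rw [PySem.List.pyRange_one_eq_nil (by omega)]
    rfl
  rw [hA, hB]
  intro heq
  have := congrArg String.toList heq
  simp only [String.toList_ofList] at this
  have hlen := congrArg List.length this
  rw [List.length_take, pvE_len] at hlen
  simp only [List.length_nil] at hlen
  omega
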